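-- pv_equiv track=rewrite | github.com/AdamZhouSE/pythonHomework | Code/CodeRecords/2874/60734/251999.py | count
-- ===== SOURCE A (Python) =====
-- def count(a):
--     if len(a) == 0:
--         return 0
--     rest_1 = rest_2 = 0
--     supposed = []
--     for i in range(len(a)):
--         if i%2==0:
--             supposed.append('P')
--         else:
--             supposed.append('G')
--
--     for i in range(len(a)):
--         if a[i] == 2 and supposed[i] == 'P':
--             rest_1 +=1
--         elif a[i] == 1 and supposed[i] == 'G':
--             rest_1 +=1
--     for i in range(len(a)):
--         if a[i] == 1 and supposed[i] == 'P':
--             rest_2+=1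
--         elif a[i] == 2 and supposed[i] == 'G':
--             rest_2+=1
--     return min(rest_1,rest_2)
-- ===== SOURCE B (Python) =====
-- def count(a):
--     evens = a[::2]
--     odds = a[1::2]
--     rest_1 = evens.count(2) + odds.count(1)
--     rest_2 = evens.count(1) + odds.count(2)
--     return min(rest_1, rest_2)
-- ===== Notes on version B (the rewrite author's own statement) =====
-- stated objective: idiomatic
-- what changed: B replaces A's construction of a 'supposed' pattern list and three index loops by splitting the list into the even-index and odd-index slices a[::2] / a[1::2] and computing each mismatch count with list.count, with no explicit Python-level loop.
import Mathlib
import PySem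

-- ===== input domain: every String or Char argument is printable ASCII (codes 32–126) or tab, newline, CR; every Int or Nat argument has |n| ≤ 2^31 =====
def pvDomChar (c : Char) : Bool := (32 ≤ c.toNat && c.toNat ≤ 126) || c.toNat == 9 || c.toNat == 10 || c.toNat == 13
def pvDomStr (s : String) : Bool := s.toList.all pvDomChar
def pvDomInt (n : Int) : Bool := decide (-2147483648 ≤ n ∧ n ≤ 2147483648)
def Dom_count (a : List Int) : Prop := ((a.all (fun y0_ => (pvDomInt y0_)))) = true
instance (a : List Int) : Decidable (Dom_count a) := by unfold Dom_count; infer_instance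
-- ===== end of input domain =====

-- B drops A's 'supposed' pattern list and its three index loops: it splits the list into the
-- even-index and odd-index slices a[::2] / a[1::2] and takes the counts there (objective: idiomatic).

-- ===== PORT A =====
def count (a : List Int) : Int :=
  if a.length = 0 then 0 else
    let supposed : List Char := (PySem.List.pyRange 0 (a.length : Int) 1).foldl
      (fun s i => s ++ [if PySem.Int.mod i 2 = 0 then 'P' else 'G']) []
    let rest1 : Int := (PySem.List.pyRange 0 (a.length : Int) 1).foldl
      (fun r i =>
        if PySem.List.pyGetD a i 0 = 2 ∧ PySem.List.pyGetD supposed i ' ' = 'P' then r + 1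
        else if PySem.List.pyGetD a i 0 = 1 ∧ PySem.List.pyGetD supposed i ' ' = 'G' then r + 1
        else r) 0
    let rest2 : Int := (PySem.List.pyRange 0 (a.length : Int) 1).foldl
      (fun r i =>
        if PySem.List.pyGetD a i 0 = 1 ∧ PySem.List.pyGetD supposed i ' ' = 'P' then r + 1
        else if PySem.List.pyGetD a i 0 = 2 ∧ PySem.List.pyGetD supposed i ' ' = 'G' then r + 1
        else r) 0
    min rest1 rest2

-- ===== PORT B =====
-- a[::2] and a[1::2] via slice?; the step 2 is nonzero, so slice? is always some and getD [] is never taken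
def count_alt (a : List Int) : Int :=
  let evens := (PySem.List.slice? a none none 2).getD []
  let odds := (PySem.List.slice? a (some 1) none 2).getD []
  let rest1 : Int := (evens.count 2 : Int) + (odds.count 1 : Int)
  let rest2 : Int := (evens.count 1 : Int) + (odds.count 2 : Int)
  min rest1 rest2

-- ===== PRECONDITION & SPEC =====
def Spec_count (a : List Int) (out : Int) : Prop := out = count_alt a
instance (a : List Int) (out : Int) : Decidable (Spec_count a out) := by unfold Spec_count; infer_instance

-- ===== CLAIM (what is proved, stated in full; the proofs are below) =====
def Claim_equal_count : Prop := ∀ (a : List Int), Dom_count a → Spec_count a (count a)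

-- ===== LEMMAS AND PROOFS =====

-- the elements of xs at even (resp. odd) positions, as the two slices compute them
def pvEvens {α : Type} : List α → List α
  | [] => []
  | [x] => [x]
  | x :: _ :: t => x :: pvEvens t

def pvOdds {α : Type} (xs : List α) : List α := pvEvens xs.tail

theorem pvEvens_cons {α : Type} (x : α) (t : List α) : pvEvens (x :: t) = x :: pvOdds t := by
  match t with
  | [] => rfl
  | y :: u => rfl

theorem pvFilterMap_range_evens {α : Type} : ∀ (xs : List α),
    List.filterMap (fun k => xs[2*k]?) (List.range ((xs.length+1)/2)) = pvEvens xs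
  | [] => by simp [pvEvens]
  | [x] => by simp [pvEvens]
  | x :: y :: t => by
    have h : ((x :: y :: t).length + 1) / 2 = (t.length + 1) / 2 + 1 := by
      simp; omega
    rw [h, List.range_succ_eq_map, List.filterMap_cons, List.filterMap_map]
    simp only [Nat.mul_zero, List.getElem?_cons_zero, Function.comp]
    have h2 : (fun k => (x :: y :: t)[2 * (k+1)]?) = (fun k => t[2*k]?) := by
      funext k
      have h3 : 2 * (k+1) = 2*k+1+1 := by omega
      rw [h3]; simp
    simp only [Nat.succ_eq_add_one, h2]
    rw [pvFilterMap_range_evens t]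
    rfl

theorem pvSlice2_zero {α : Type} (xs : List α) :
    PySem.List.slice? xs none none 2 = some (pvEvens xs) := by
  simp only [PySem.List.slice?, PySem.List.sliceIndices]
  norm_num
  rw [← pvFilterMap_range_evens xs]
  have hc : (if 0 < xs.length then (((xs.length : Int) + 2 - 1)/2).toNat else 0) = (xs.length+1)/2 := by
    split <;> omega
  rw [hc]
  congr 1

theorem pvSlice2_one {α : Type} (xs : List α) :
    PySem.List.slice? xs (some 1) none 2 = some (pvOdds xs) := by
  match xs with
  | [] => simp [pvOdds, pvEvens, PySem.List.slice?, PySem.List.sliceIndices]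
  | x :: t => ?_
  simp only [PySem.List.slice?, PySem.List.sliceIndices]
  norm_num
  have hc : (if 0 < t.length then (((t.length : Int) + 2 - 1) / 2).toNat else 0) = (t.length+1)/2 := by
    split <;> omega
  have hf : (fun (k : Nat) => (x :: t)[(1 + 2*(k : Int)).toNat]?) = (fun k => t[2*k]?) := by
    funext k
    have h4 : (1 + 2*(k : Int)).toNat = 2*k+1 := by omega
    rw [h4]
    simp
  rw [hc, hf, pvFilterMap_range_evens t]
  rfl

-- A's rest_1 / rest_2 counts, read off the enumerate view: positions of even global parity
-- contribute u-matches, odd positions v-matches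
theorem pvCountP_enum (u v : Int) : ∀ (a : List Int) (s : Int),
    (PySem.List.enumerate a s).countP
      (fun z => decide ((z.2 = u ∧ PySem.Int.mod z.1 2 = 0) ∨ (z.2 = v ∧ PySem.Int.mod z.1 2 = 1)))
    = if PySem.Int.mod s 2 = 0 then (pvEvens a).count u + (pvOdds a).count v
      else (pvEvens a).count v + (pvOdds a).count u := by
  intro a
  induction a with
  | nil => intro s; simp [pvEvens, pvOdds]
  | cons x t ih =>
    intro s
    have h2 : PySem.Int.mod s 2 = s % 2 := PySem.Int.mod_eq_emod_of_pos (by norm_num)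
    have h3 : PySem.Int.mod (s+1) 2 = (s+1) % 2 := PySem.Int.mod_eq_emod_of_pos (by norm_num)
    rw [PySem.List.enumerate_cons, List.countP_cons, ih (s+1), pvEvens_cons]
    have hodd : pvOdds (x :: t) = pvEvens t := rfl
    rw [hodd]
    by_cases he : s % 2 = 0
    · have ho : (s+1) % 2 = 1 := by omega
      simp only [h2, h3, he, ho]
      norm_num
      by_cases hx : x = u <;> by_cases hy : x = v <;>
        simp [List.count_cons, hx, hy, pvOdds] <;> omega
    · have he1 : s % 2 = 1 := by omega
      have ho : (s+1) % 2 = 0 := by omega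
      simp only [h2, h3, he1, ho]
      norm_num
      by_cases hx : x = u <;> by_cases hy : x = v <;>
        simp [List.count_cons, hx, hy, pvOdds] <;> omega

theorem pvSupposed_getD (n : Nat) (i : Int) (h0 : 0 ≤ i) (hi : i < (n : Int)) :
    PySem.List.pyGetD
      ((PySem.List.pyRange 0 (n : Int) 1).foldl
        (fun s j => s ++ [if PySem.Int.mod j 2 = 0 then 'P' else 'G']) []) i ' '
      = (if PySem.Int.mod i 2 = 0 then 'P' else 'G') := by
  rw [PySem.List.foldl_append_singleton_eq_map]
  simp only [List.nil_append]
  exact PySem.List.pyGetD_map_pyRange_of_nonneg _ _ _ _ h0 hi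

theorem pvRest (u v : Int) (a : List Int) :
    (PySem.List.pyRange 0 (a.length : Int) 1).foldl
      (fun r i =>
        if PySem.List.pyGetD a i 0 = u ∧
            PySem.List.pyGetD
              ((PySem.List.pyRange 0 (a.length : Int) 1).foldl
                (fun s j => s ++ [if PySem.Int.mod j 2 = 0 then 'P' else 'G']) []) i ' ' = 'P' then r + 1
        else if PySem.List.pyGetD a i 0 = v ∧
            PySem.List.pyGetD
              ((PySem.List.pyRange 0 (a.length : Int) 1).foldl
                (fun s j => s ++ [if PySem.Int.mod j 2 = 0 then 'P' else 'G']) []) i ' ' = 'G' then r + 1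
        else r) (0 : Int)
    = ((pvEvens a).count u : Int) + ((pvOdds a).count v : Int) := by
  have hcong := PySem.List.foldl_congr_mem (PySem.List.pyRange 0 (a.length : Int) 1)
      (fun (r : Int) (i : Int) =>
        if PySem.List.pyGetD a i 0 = u ∧
            PySem.List.pyGetD
              ((PySem.List.pyRange 0 (a.length : Int) 1).foldl
                (fun s j => s ++ [if PySem.Int.mod j 2 = 0 then 'P' else 'G']) []) i ' ' = 'P' then r + 1
        else if PySem.List.pyGetD a i 0 = v ∧
            PySem.List.pyGetD
              ((PySem.List.pyRange 0 (a.length : Int) 1).foldl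
                (fun s j => s ++ [if PySem.Int.mod j 2 = 0 then 'P' else 'G']) []) i ' ' = 'G' then r + 1
        else r)
      (fun (r : Int) (i : Int) =>
        if (PySem.List.pyGetD a i 0 = u ∧ PySem.Int.mod i 2 = 0) ∨
           (PySem.List.pyGetD a i 0 = v ∧ PySem.Int.mod i 2 = 1) then r + 1 else r)
      (0 : Int)
      (by
        intro r i hi
        rw [PySem.List.mem_pyRange_one] at hi
        dsimp only
        rw [pvSupposed_getD a.length i hi.1 hi.2]
        have h2 : PySem.Int.mod i 2 = i % 2 := PySem.Int.mod_eq_emod_of_pos (by norm_num)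
        by_cases he : i % 2 = 0
        · simp [he]
        · have h1 : i % 2 = 1 := by omega
          simp [h1])
  rw [hcong, PySem.List.foldl_ite_add_one]
  rw [show (PySem.List.pyRange 0 (a.length : Int) 1).countP
        (fun i => decide ((PySem.List.pyGetD a i 0 = u ∧ PySem.Int.mod i 2 = 0) ∨
                          (PySem.List.pyGetD a i 0 = v ∧ PySem.Int.mod i 2 = 1)))
      = (PySem.List.enumerate a 0).countP
          (fun z => decide ((z.2 = u ∧ PySem.Int.mod z.1 2 = 0) ∨ (z.2 = v ∧ PySem.Int.mod z.1 2 = 1))) from by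
    rw [PySem.List.enumerate_eq_map_pyRange (d := 0), List.countP_map]
    rfl]
  rw [pvCountP_enum u v a 0]
  norm_num

-- ===== VERDICT (by name: the statement is the Claim_ definition above) =====
theorem count_spec : Claim_equal_count := by
  intro a _
  show count a = count_alt a
  rw [count, count_alt, pvSlice2_zero, pvSlice2_one]
  by_cases h : a.length = 0
  · rw [List.length_eq_zero_iff] at h
    subst h
    simp [pvEvens, pvOdds]
  · rw [if_neg (by simpa using h)]
    simp only [Option.getD_some]
    rw [pvRest 2 1 a, pvRest 1 2 a]
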